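/- GENERATED by mk_final_copies.py from the proof of the farm's unit `start_decoder.C16` (farm:start_decoder.C16.1: Lemmas.lean) as the
   re-elaboration sweep compiled it — do not edit. -/
/-
  start_decoder.C16 (0x1151bf – 0x11520b; stb_vorbis_fixed.c:3956 – 3959): the PURE lemmas of the unit (no machine walk).

      obj_where        where `*f` is: a stack object of a CALLER (above the return-address slot) or off the stack region
      Keep             the memory-dependent part of a cut point of this segment: `Mid g 5 5 5`, the saved registers, the text,
                       the shadow layer, `log2_4`, the function's footprint
      Keep.of_frame    … from `Frame` and `Mid` at a cut point
      Keep.toFrame     … back to `Frame` at another program counter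
      Keep.callee      … over a callee whose footprint is its own stack (below the steady rsp) and reader / error windows of `*f`
      sd5_of_mid       `Real.SD len 5` back from `Mid g 5 5 5 A.1 A` (the hand-over `BodyF1` asks for it)
-/
import Vorbis.Spec.StartDecoderA
import Vorbis.Spec.StartDecoderB
import Vorbis.Spec.StartDecoderBTest
import Vorbis.Spec.Reader
import Vorbis.Spec.Leaves

open X86 X86.User Asan Vorbis Vorbis.Spec Vorbis.Spec.StartDecoder

namespace Vorbis.Spec.start_decoder_C16

/-- **Where `*f` is**: inside the data space, above the text, and either a stack object of a CALLER's protected frame (above the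
return-address slot `[RA]` of this activation) or off the stack region altogether. -/
theorem obj_where {u₀ : State} {g : Ghost} {pc : Word} {A : Arena × List Obj} {v : State}
    (hf : Frame u₀ g pc A v) (hh : g.Hand A) :
    0x119d40 ≤ g.f ∧ g.f + 1808 ≤ 0xC00000 ∧ (g.RA + 8 ≤ g.f ∨ g.f + 1808 ≤ 0x700000 ∨ 0x800000 ≤ g.f) := by
  have hw := (hh.obj.mono (frames'_sub g A.2)).where_ hf.shadow hf.offText (by decide)
  simp only [Off.sizeof.stb_vorbis] at hw
  obtain ⟨hw1, hw2, _⟩ := hw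
  refine ⟨hw1, hw2, ?_⟩
  obtain ⟨o, ho, h1, h2⟩ := hh.obj
  simp only [Off.sizeof.stb_vorbis] at h2
  rcases List.mem_append.mp ho with hs | hoth
  · -- a stack object of a caller's frame: the frame lies above the return-address slot
    left
    unfold stackObjs at hs
    obtain ⟨bF, hbF, hin⟩ := List.mem_flatMap.mp hs
    have hmem : bF ∈ g.frames' := List.mem_cons_of_mem _ hbF
    obtain ⟨k1, k2, _, _, _⟩ := hf.shadow.stack.active bF hmem
    obtain ⟨g1, _⟩ := FrameLayout.objsAt_gran k1 k2 hin
    have hc := hf.callers bF hbF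
    have e1 : o.gLo = o.base / 8 := rfl
    omega
  · -- one of the `others`: off the stack region
    right
    have hoff := hf.shadow.off o hoth
    unfold OffStack at hoff
    omega

/-- The steady stack pointer and the return-address slot as numbers: `R + 1480 = RA`, both 8-aligned, inside the stack region with
`1888` bytes of room below `RA`. -/
theorem frame_nums {u₀ : State} {g : Ghost} {pc : Word} {A : Arena × List Obj} {v : State} (hf : Frame u₀ g pc A v) :
    g.R + 1480 = g.RA ∧ g.R % 8 = 0 ∧ 0x700000 + 1888 ≤ g.RA ∧ g.RA + 8 ≤ 0x800000 := by
  obtain ⟨h1, h2, h3⟩ := hf.ra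
  obtain ⟨h4, h5⟩ := hf.r_eq
  simp only [depth, steady] at h2 h4
  exact ⟨h4, h5, h2, h3⟩

/-- **The memory-dependent part of a cut point of this segment**: the decoder invariant between SD.5's clauses (`Mid g 5 5 5`, over
the blocks of the current arena), and the memory-dependent fields of `Frame` (the saved registers and the return address, the
text, the shadow layer with the own frame poisoned, `log2_4`, the function's footprint). -/
structure Keep (u₀ : State) (g : Ghost) (A : Arena × List Obj) (mem : Mem) : Prop where
  /-- the invariant inside the time-domain loop: the clauses of SD.5 -/
  mid : Mid g 5 5 5 A.1 A mem
  saved_rbx : mem.u64 (g.R + 0x598) = (g.e.reg .rbx).toNat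
  saved_rbp : mem.u64 (g.R + 0x5a0) = (g.e.reg .rbp).toNat
  saved_r12 : mem.u64 (g.R + 0x5a8) = (g.e.reg .r12).toNat
  saved_r13 : mem.u64 (g.R + 0x5b0) = (g.e.reg .r13).toNat
  saved_r14 : mem.u64 (g.R + 0x5b8) = (g.e.reg .r14).toNat
  saved_r15 : mem.u64 (g.R + 0x5c0) = (g.e.reg .r15).toNat
  saved_ra : mem.u64 (g.R + 0x5c8) = g.ret.toNat
  code : CodeOK u₀ mem
  shadow : ShadowInv A.2 g.frames' g.R mem
  sh7 : Log2_4In mem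
  same : Mem.SameExcept (footprint g) g.e.mem mem

/-- `Keep` at a cut point: from its `Frame` and the invariant. -/
theorem Keep.of_frame {u₀ : State} {g : Ghost} {pc : Word} {A : Arena × List Obj} {v : State} (hf : Frame u₀ g pc A v)
    (hm : Mid g 5 5 5 A.1 A v.mem) : Keep u₀ g A v.mem :=
  { mid := hm
    saved_rbx := hf.saved_rbx
    saved_rbp := hf.saved_rbp
    saved_r12 := hf.saved_r12
    saved_r13 := hf.saved_r13
    saved_r14 := hf.saved_r14
    saved_r15 := hf.saved_r15
    saved_ra := hf.saved_ra
    code := hf.code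
    shadow := hf.shadow
    sh7 := hf.sh7
    same := hf.same }

/-- **`Frame` at another state of the same activation** whose memory satisfies `Keep`: the memory-independent fields come from the
`Frame` of an earlier cut point. -/
theorem Keep.toFrame {u₀ : State} {g : Ghost} {pc pc' : Word} {A : Arena × List Obj} {v s : State} (hk : Keep u₀ g A s.mem)
    (hf : Frame u₀ g pc A v) (hrip : s.rip = pc') (hrsp : s.reg .rsp = addr g.R) (hinv : abiInv s) : Frame u₀ g pc' A s :=
  { entry := hf.entry
    rip := hrip
    rsp := hrsp
    shadowIdx := hk.mid.consts.shadowIdx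
    saved_rbx := hk.saved_rbx
    saved_rbp := hk.saved_rbp
    saved_r12 := hk.saved_r12
    saved_r13 := hk.saved_r13
    saved_r14 := hk.saved_r14
    saved_r15 := hk.saved_r15
    saved_ra := hk.saved_ra
    code := hk.code
    inv := hinv
    shadow := hk.shadow
    offText := hf.offText
    ext := hf.ext
    callers := hf.callers
    sh7 := hk.sh7
    same := hk.same }

/-- **Where a window of a callee of this segment may lie**: in the function's own stack below the steady stack pointer (the
callee's frame and the pushed return address), or inside one of the windows of `*f` that `get_bits` (`Reader.winsBits`) and
`error` (`[f + 140, f + 144)`) write. -/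
def WinOK (g : Ghost) (w : Span) : Prop :=
  (g.RA - 1888 ≤ w.lo ∧ w.hi ≤ g.R) ∨ (g.f + 48 ≤ w.lo ∧ w.hi ≤ g.f + 56) ∨ (g.f + 84 ≤ w.lo ∧ w.hi ≤ g.f + 96) ∨
    (g.f + 136 ≤ w.lo ∧ w.hi ≤ g.f + 144) ∨ (g.f + 1484 ≤ w.lo ∧ w.hi ≤ g.f + 1749) ∨
    (g.f + 1752 ≤ w.lo ∧ w.hi ≤ g.f + 1784)

/-- **`Keep` OVER A CALLEE OF THIS SEGMENT** (`get_bits`, `error`, together with the push of the return address): the footprint `ws`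
lies in the function's own stack below the steady stack pointer and in the reader / error windows of `*f` (`WinOK`); no shadow
byte was written; `Bits f` and the text are given for the new memory (the callee's post, its `Returned.code`). -/
theorem Keep.callee {u₀ : State} {g : Ghost} {pc : Word} {A : Arena × List Obj} {v : State} {mem mem' : Mem} {ws : List Span}
    (hk : Keep u₀ g A mem) (hf : Frame u₀ g pc A v) (hh : g.Hand A) (hs : Mem.SameExcept ws mem mem')
    (hws : ∀ w, w ∈ ws → WinOK g w) (hun : ShadowUntouched mem mem') (hbits : Bits (g.Blk A) g.len mem' g.f)
    (hcode : CodeOK u₀ mem') : Keep u₀ g A mem' := by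
  obtain ⟨n1, n2, n3, n4⟩ := frame_nums hf
  obtain ⟨w1, w2, w3⟩ := obj_where hf hh
  have ha := hk.mid.arena
  -- a window of the callee misses every range that lies off its stack and off the written fields of `*f`
  have hoff : ∀ lo hi : Nat, (g.R ≤ lo ∨ hi ≤ g.RA - 1888) →
      (hi ≤ g.f + 48 ∨ g.f + 56 ≤ lo ∧ hi ≤ g.f + 84 ∨ g.f + 96 ≤ lo ∧ hi ≤ g.f + 136 ∨ g.f + 144 ≤ lo ∧ hi ≤ g.f + 1484 ∨
        g.f + 1749 ≤ lo ∧ hi ≤ g.f + 1752 ∨ g.f + 1784 ≤ lo) →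
      ∀ w, w ∈ ws → hi ≤ w.lo ∨ w.hi ≤ lo := by
    intro lo hi h1 h2 w hw
    have := hws w hw
    unfold WinOK at this
    omega
  have heq : ∀ lo hi : Nat, (g.R ≤ lo ∨ hi ≤ g.RA - 1888) →
      (hi ≤ g.f + 48 ∨ g.f + 56 ≤ lo ∧ hi ≤ g.f + 84 ∨ g.f + 96 ≤ lo ∧ hi ≤ g.f + 136 ∨ g.f + 144 ≤ lo ∧ hi ≤ g.f + 1484 ∨
        g.f + 1749 ≤ lo ∧ hi ≤ g.f + 1752 ∨ g.f + 1784 ≤ lo) → Mem.EqOn lo hi mem mem' :=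
    fun lo hi h1 h2 => hs.eqOn lo hi (hoff lo hi h1 h2)
  -- the saved registers and the return address: above the steady stack pointer, off `*f`
  have hsaved : Mem.EqOn (g.R + 0x598) (g.R + 0x5d0) mem mem' := heq _ _ (by omega) (by omega)
  -- the invariant
  have hmid : Mid g 5 5 5 A.1 A mem' := by
    apply hk.mid.frame
    · -- the windows of `*f` that `Mid` reads
      apply ObjEq.of_sameExcept hs
      · intro w hw
        have hhi := Mid.hi_le 5
        simp only [Mid.winsAt, List.mem_cons, List.mem_nil_iff, or_false] at hw
        rcases hw with rfl | rfl | rfl | rfl | rfl | rfl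
        all_goals
          simp only []
          omega
      · intro w hw
        have hhi := Mid.hi_le 5
        have hlo := Mid.hi_ge 5
        have hr : restFrom 5 = 176 := by
          simp only [restFrom, voff]
          decide
        simp only [Mid.winsAt, List.mem_cons, List.mem_nil_iff, or_false] at hw
        rcases hw with rfl | rfl | rfl | rfl | rfl | rfl
        · exact hoff _ _ (by omega) (by simp only []; omega)
        · exact hoff _ _ (by omega) (by simp only []; omega)
        · exact hoff _ _ (by omega) (by simp only []; omega)
        · exact hoff _ _ (by omega) (by simp only []; omega)
        · exact hoff _ _ (by omega) (by simp only []; omega)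
        · exact hoff _ _ (by omega) (by simp only []; omega)
    · -- every block of the arena: inside the arena's buffer, off the stack, and `*f` lies outside the arena
      apply AllKept.of_sameExcept ha.blkOK hs
      intro B hB w hw
      have hin := arena_inside ha hB
      have hst := ha.blk_off_stack hB
      have hout := hh.objOut
      simp only [Off.sizeof.stb_vorbis] at hout
      have := hws w hw
      unfold WinOK at this
      omega
    · exact hk.mid.consts.frame (heq _ _ (by omega) (by omega)) (by omega)
    · intro h6
      omega
    · exact hun
    · apply ha.frame (by simp only [voff]; omega)
      simp only [voff]
      exact heq _ _ (by omega) (by omega)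
    · exact hbits
  refine ⟨hmid, ?_, ?_, ?_, ?_, ?_, ?_, ?_, hcode, hk.shadow.untouched hun, ?_, ?_⟩
  · rw [hsaved.u64 _ (by omega) (by omega) (by omega)]
    exact hk.saved_rbx
  · rw [hsaved.u64 _ (by omega) (by omega) (by omega)]
    exact hk.saved_rbp
  · rw [hsaved.u64 _ (by omega) (by omega) (by omega)]
    exact hk.saved_r12
  · rw [hsaved.u64 _ (by omega) (by omega) (by omega)]
    exact hk.saved_r13
  · rw [hsaved.u64 _ (by omega) (by omega) (by omega)]
    exact hk.saved_r14
  · rw [hsaved.u64 _ (by omega) (by omega) (by omega)]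
    exact hk.saved_r15
  · rw [hsaved.u64 _ (by omega) (by omega) (by omega)]
    exact hk.saved_ra
  · -- SH7: `*f` and the global `log2_4` are two allocated blocks of the run's predicate, hence disjoint
    have hobj : g.Blk A (objBlock g.f) := runBlk_extra List.mem_cons_self
    have hglob : g.Blk A ⟨0x120640, 16⟩ := by
      apply runBlk_extra
      simp only [fixedBlocks, globalBlocks, List.mem_cons, Block.mk.injEq, true_or, or_true]
    have hne : objBlock g.f ≠ ⟨0x120640, 16⟩ := by
      intro e
      have := congrArg Block.size e
      simp only [vblock, voff] at this
      omega
    have hd := hk.mid.env.ok.disjoint hobj hglob hne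
    simp only [vblock, voff] at hd
    have hglobal : Mem.EqOn 0x120640 0x120650 mem mem' := heq _ _ (by omega) (by omega)
    intro i hi
    have e : (UInt64.ofNat (Vorbis.Globals.log2_4.beg + i)).toNat = 0x120640 + i := by
      simp only [Vorbis.Globals.log2_4]
      exact toNat_addr _ (by omega)
    rw [hglobal.readLE _ 1 (by omega) (by omega) (by omega)]
    exact hk.sh7 i hi
  · -- the function's footprint: its stack and `*f` are windows of it
    apply hk.same.step_same hs
    intro w hw a ha1 ha2
    have := hws w hw
    unfold WinOK at this
    rcases this with hst | hobj
    · refine ⟨⟨g.RA - depth, g.RA⟩, List.mem_cons_self, ?_, ?_⟩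
      · simp only [depth]
        omega
      · show a < g.RA
        omega
    · refine ⟨(objBlock (g.e.reg .rdi).toNat).span, List.mem_cons_of_mem _ List.mem_cons_self, ?_, ?_⟩
      · simp only [vblock, voff]
        show g.f ≤ a
        omega
      · simp only [vblock, voff]
        show a < g.f + 1808
        omega

/-- **The error exit of the time-domain loop**: SD.ERR (`Failed`) from the invariant; `residue_config` and `mapping` are still NULL. -/
theorem failed_of_mid {g : Ghost} {A : Arena × List Obj} {mem : Mem} (h : Mid g 5 5 5 A.1 A mem) :
    Failed g.len g.f (g.Live A) A mem :=
  h.failed (by omega) (h.h2_null (by omega) _) (h.h3_null (by omega) _) (h.h5_null (by omega) _)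

/-- **Back to `Real.SD len 5`** (what the hand-over `BodyF1` states) from the invariant inside the loop: the block-carrying groups
over the run's predicate follow from the record over the arena's (`up`). -/
theorem sd5_of_mid {g : Ghost} {A : Arena × List Obj} {mem : Mem} (h : Mid g 5 5 5 A.1 A mem) :
    Real.SD g.len 5 A (g.Blk A) (g.Live A) mem g.f g.R := by
  have hcb := h.own.cb0 (by omega)
  have hne := h.own.nonnull (by omega)
  have hcnt := (hcb.ok hne).F1
  exact
    { env := h.env
      frame := h.consts
      arena := h.arena
      setups := up g A
      noTemps := h.noTemps
      bits := h.bits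
      first := h.first
      discard0 := h.discard0
      header := fun _ => h.header
      commentZero := fun h1 => absurd h1 (by omega)
      comment := fun _ => CommentsOK.reblk (h.own.comment (by omega)) (fun B _ hB => up g A B hB)
      cb0 := fun _ => ⟨CB0.reblk hcb (fun B _ hB => up g A B hB), hne⟩
      codebooks := fun _ =>
        { cb0 := CB0.reblk hcb (fun B _ hB => up g A B hB)
          nonnull := hne
          upto := by omega
          ok := fun i hi => (h.own.books (by omega) i (by omega)).reblk (fun B _ hB => up g A B hB) }
      floor := fun h6 => absurd h6 (by omega)
      lfl := fun h6 _ => absurd h6 (by omega)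
      residue := fun h7 => absurd h7 (by omega)
      mapping := fun h8 => absurd h8 (by omega)
      mode := fun h9 => absurd h9 (by omega)
      buffers := fun h10 => absurd h10 (by omega)
      mdct := fun h11 => absurd h11 (by omega)
      temp := fun h12 => absurd h12 (by omega)
      rest := h.rest }

/-- **`Keep` over the push of a return address** by a `call` executed at the steady stack pointer (the 8 bytes `[R − 8, R)`); no
shadow byte is written. -/
theorem Keep.push {u₀ : State} {g : Ghost} {pc : Word} {A : Arena × List Obj} {v : State} {mem : Mem}
    (hk : Keep u₀ g A mem) (hf : Frame u₀ g pc A v) (hh : g.Hand A) (a : Word) (x : Nat) (ha : a.toNat + 8 = g.R) :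
    Keep u₀ g A (mem.writeLE a 8 x) ∧ ShadowUntouched mem (mem.writeLE a 8 x) := by
  obtain ⟨n1, n2, n3, n4⟩ := frame_nums hf
  obtain ⟨w1, w2, w3⟩ := obj_where hf hh
  have hs : Mem.SameExcept [⟨g.R - 8, g.R⟩] mem (mem.writeLE a 8 x) := by
    apply Mem.SameExcept.writeLE _ _ _ _ _ (by omega)
    exact ⟨⟨g.R - 8, g.R⟩, List.mem_cons_self, by simp only []; omega, by simp only []; omega⟩
  have hun : ShadowUntouched mem (mem.writeLE a 8 x) :=
    Mem.EqOn.writeLE _ _ _ _ _ _ (by omega) (by omega)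
  have hbits : Bits (g.Blk A) g.len (mem.writeLE a 8 x) g.f :=
    Reader.bits_of_window hk.mid.bits hs (by omega)
  have hcode : CodeOK u₀ (mem.writeLE a 8 x) := by
    have e1 : L.textLo = 0x100000 := rfl
    have e2 : L.textHi = 0x119d40 := rfl
    exact Mem.EqOn.step_writeLE a 8 x hk.code (by omega) (by omega)
  refine ⟨hk.callee hf hh hs ?_ hun hbits hcode, hun⟩
  intro w hw
  have e : w = ⟨g.R - 8, g.R⟩ := List.mem_singleton.mp hw
  subst e
  unfold WinOK
  simp only []
  omega

/-- **`Keep` over a returned `get_bits`** entered at the stack pointer `rsp = R − 8` with `rdi = f`: the footprint is the literal list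
of `get_bits.spec_writes` under the callee's stack frame (352 bytes). `Bits f` is the callee's post. -/
theorem Keep.get_bits {u₀ : State} {g : Ghost} {pc : Word} {A : Arena × List Obj} {v : State} {m1 m2 : Mem} {rsp rdi : Nat}
    (hk : Keep u₀ g A m1) (hf : Frame u₀ g pc A v) (hh : g.Hand A) (hrsp : rsp + 8 = g.R) (hrdi : rdi = g.f)
    (hs : Mem.SameExcept [⟨rsp - 352, rsp⟩, ⟨rdi + 48, rdi + 56⟩, ⟨rdi + 84, rdi + 96⟩, ⟨rdi + 136, rdi + 144⟩,
      ⟨rdi + 1484, rdi + 1749⟩, ⟨rdi + 1752, rdi + 1784⟩] m1 m2)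
    (hun : ShadowUntouched m1 m2) (hbits : Bits (g.Blk A) g.len m2 g.f) (hcode : (conv u₀).code.In m2) :
    Keep u₀ g A m2 := by
  obtain ⟨n1, n2, n3, n4⟩ := frame_nums hf
  refine hk.callee hf hh hs ?_ hun hbits (conv_code_eqOn hcode)
  intro w hw
  subst hrdi
  simp only [List.mem_cons, List.mem_nil_iff, or_false] at hw
  unfold WinOK
  rcases hw with rfl | rfl | rfl | rfl | rfl | rfl
  all_goals
    simp only []
    omega

/-- **`Keep` over a returned `error`** entered at the stack pointer `rsp = R − 8` with `rdi = f`: it writes `f->error` and 48 bytes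
of its own stack; `Bits f` reads none of them. -/
theorem Keep.error {u₀ : State} {g : Ghost} {pc : Word} {A : Arena × List Obj} {v : State} {m1 m2 : Mem} {rsp rdi : Nat}
    (hk : Keep u₀ g A m1) (hf : Frame u₀ g pc A v) (hh : g.Hand A) (hrsp : rsp + 8 = g.R) (hrdi : rdi = g.f)
    (hs : Mem.SameExcept [⟨rsp - 48, rsp⟩, ⟨rdi + 140, rdi + 140 + 4⟩] m1 m2)
    (hun : ShadowUntouched m1 m2) (hcode : (conv u₀).code.In m2) : Keep u₀ g A m2 := by
  obtain ⟨n1, n2, n3, n4⟩ := frame_nums hf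
  obtain ⟨w1, w2, w3⟩ := obj_where hf hh
  subst hrdi
  have hbits : Bits (g.Blk A) g.len m2 g.f := by
    apply hk.mid.bits.frame_fields
    apply Bits.SameFields.of_sameExcept hs
    all_goals
      intro w hw
      simp only [List.mem_cons, List.mem_nil_iff, or_false] at hw
      rcases hw with rfl | rfl
      all_goals
        simp only []
        omega
  refine hk.callee hf hh hs ?_ hun hbits (conv_code_eqOn hcode)
  intro w hw
  simp only [List.mem_cons, List.mem_nil_iff, or_false] at hw
  unfold WinOK
  rcases hw with rfl | rfl
  all_goals
    simp only []
    omega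

end Vorbis.Spec.start_decoder_C16
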